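-- pv_equiv track=rewrite | github.com/githover/Algorithm | 프로그래머스/0/120848. 팩토리얼/팩토리얼.py | solution
-- ===== SOURCE A (Python) =====
-- def solution(n):
--     answer = 0
--     a = 1
--     for i in range(1,n+1):
--         a *= i
--         if a <= n:
--             # a *= i #넘어가기 전 시점이후에 곱하면 넘어가버림
--             answer = i
--         else:
--             break
--     return answer
-- ===== SOURCE B (Python) =====
-- def solution(n):
--     # Binary search for the largest i with i! <= n (monotone predicate),
--     # after an exponential (doubling) phase to bracket the answer.
--     def fact(k):
--         f = 1
--         for j in range(2, k + 1):
--             f *= j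
--         return f
--
--     if n < 1:
--         return 0
--     hi = 1
--     while fact(2 * hi) <= n:
--         hi *= 2
--     lo, hi = hi, 2 * hi  # invariant: fact(lo) <= n < fact(hi)
--     while hi - lo > 1:
--         mid = (lo + hi) // 2
--         if fact(mid) <= n:
--             lo = mid
--         else:
--             hi = mid
--     return lo
-- ===== Notes on version B (the rewrite author's own statement) =====
-- stated objective: alternative
-- what changed: Replaces A's single incremental loop that multiplies up a running factorial and breaks on overflow with an exponential-doubling phase plus a binary search over the monotone predicate fact(i) <= n, recomputing the factorial at each probe.
import Mathlib
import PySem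

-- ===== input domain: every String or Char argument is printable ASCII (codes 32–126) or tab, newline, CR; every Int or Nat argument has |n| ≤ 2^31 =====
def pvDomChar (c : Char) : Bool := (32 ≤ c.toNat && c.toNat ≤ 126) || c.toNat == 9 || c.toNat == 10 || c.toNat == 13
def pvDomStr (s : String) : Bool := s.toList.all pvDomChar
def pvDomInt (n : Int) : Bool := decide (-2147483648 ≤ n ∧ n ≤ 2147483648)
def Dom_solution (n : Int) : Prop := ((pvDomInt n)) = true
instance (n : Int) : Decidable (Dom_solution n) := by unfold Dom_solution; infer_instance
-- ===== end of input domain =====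

-- B replaces A's incremental multiply-and-break loop by an exponential-doubling phase
-- plus a binary search over the monotone predicate fact(i) <= n; alternative algorithm,
-- the factorial is recomputed at each probe (B trades a few repeated products for a
-- different search structure, not for speed).

-- ===== PORT A =====
-- the for-loop over range(1, n+1) with state (a, answer) and an early break
def solutionLoopA (n : Int) : List Int → Int → Int → Int
  | [], _, answer => answer
  | i :: rest, a, answer =>
      let a' := a * i
      if a' ≤ n then solutionLoopA n rest a' i else answer

def solution (n : Int) : Int :=
  solutionLoopA n (PySem.List.pyRange 1 (n + 1) 1) 1 0

-- ===== PORT B =====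
-- fact(k): f = 1; for j in range(2, k+1): f *= j
def factB (k : Int) : Int :=
  (PySem.List.pyRange 2 (k + 1) 1).foldl (· * ·) 1

-- used by the doubling loop's termination argument (cited in decreasing_by)
lemma factB_self_le {m : Int} (hm : 1 ≤ m) : m ≤ factB m := by
  rcases Int.le_iff_lt_or_eq.mp hm with hlt | heq
  · have : PySem.List.pyRange 2 (m + 1) 1
        = PySem.List.pyRange 2 m 1 ++ [m] := by
      have := PySem.List.pyRange_one_succ_right (a := 2) (b := m) (by omega)
      simpa using this
    unfold factB
    rw [this, List.foldl_append]
    have hpos : ∀ l : List Int, (∀ x ∈ l, 1 ≤ x) → ∀ acc : Int, 1 ≤ acc →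
        acc ≤ l.foldl (· * ·) acc := by
      intro l
      induction l with
      | nil => intro _ acc hacc; simp
      | cons x xs ih =>
          intro hmem acc hacc
          have hx : 1 ≤ x := hmem x (by simp)
          have h1 : acc ≤ acc * x := le_mul_of_one_le_right (by omega) hx
          have h2 := ih (fun y hy => hmem y (by simp [hy])) (acc * x)
            (by nlinarith)
          simp only [List.foldl_cons]
          omega
    have hge : 1 ≤ (PySem.List.pyRange 2 m 1).foldl (· * ·) 1 := by
      apply hpos
      · intro x hx
        have := (PySem.List.mem_pyRange_one).mp hx
        omega
      · omega
    simp only [List.foldl_cons, List.foldl_nil]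
    nlinarith
  · subst heq
    simp [factB, PySem.List.pyRange_one_eq_nil]

-- while fact(2*hi) <= n: hi *= 2      (the '1 ≤ hi' conjunct only makes the
-- recursion total; it holds at the call site and is preserved by doubling)
def dblLoop (n hi : Int) : Int :=
  if h : factB (2 * hi) ≤ n ∧ 1 ≤ hi then dblLoop n (2 * hi) else hi
termination_by (n - hi).toNat
decreasing_by
  have h1 : 2 * hi ≤ factB (2 * hi) := factB_self_le (by omega)
  omega

-- while hi - lo > 1: mid = (lo+hi)//2; if fact(mid) <= n: lo = mid else: hi = mid
def bsLoop (n lo hi : Int) : Int :=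
  if _h : 1 < hi - lo then
    let mid := PySem.Int.floordiv (lo + hi) 2
    if factB mid ≤ n then bsLoop n mid hi else bsLoop n lo mid
  else lo
termination_by (hi - lo).toNat
decreasing_by
  · rw [PySem.Int.floordiv_eq_ediv_of_pos (by omega)]; omega
  · rw [PySem.Int.floordiv_eq_ediv_of_pos (by omega)]; omega

def solution_alt (n : Int) : Int :=
  if n < 1 then 0
  else
    let hi := dblLoop n 1
    bsLoop n hi (2 * hi)

-- ===== PRECONDITION & SPEC =====
def Spec_solution (n : Int) (out : Int) : Prop := out = solution_alt n
instance (n : Int) (out : Int) : Decidable (Spec_solution n out) := by unfold Spec_solution; infer_instance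

-- ===== CLAIM (what is proved, stated in full; the proofs are below) =====
def Claim_equal_solution : Prop := ∀ (n : Int), Dom_solution n → Spec_solution n (solution n)

-- ===== LEMMAS AND PROOFS =====

-- factB agrees with Nat.factorial on naturals
lemma factB_natCast (k : Nat) : factB (k : Int) = (Nat.factorial k : Int) := by
  induction k with
  | zero => simp [factB, PySem.List.pyRange_one_eq_nil, Nat.factorial]
  | succ m ih =>
      rcases Nat.eq_zero_or_pos m with hm | hm
      · subst hm
        simp [factB, PySem.List.pyRange_one_eq_nil, Nat.factorial]
      · have hsplit : PySem.List.pyRange 2 ((m:Int) + 1 + 1) 1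
            = PySem.List.pyRange 2 ((m:Int) + 1) 1 ++ [(m:Int) + 1] := by
          have := PySem.List.pyRange_one_succ_right (a := 2) (b := (m:Int) + 1)
            (by exact_mod_cast Nat.succ_le_of_lt (by omega))
          simpa using this
        unfold factB at ih ⊢
        push_cast
        rw [hsplit, List.foldl_append, ih]
        simp [Nat.factorial_succ]
        ring

lemma factB_of_nonneg (m : Int) (hm : 0 ≤ m) : factB m = (Nat.factorial m.toNat : Int) := by
  have h : m = ((m.toNat : Nat) : Int) := by omega
  rw [h, factB_natCast]
  simp
  congr 1
  omega

lemma factB_succ {m : Int} (hm : 0 ≤ m) : factB (m + 1) = factB m * (m + 1) := by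
  rw [factB_of_nonneg m hm, factB_of_nonneg (m + 1) (by omega)]
  have h1 : (m + 1).toNat = m.toNat + 1 := by omega
  rw [h1, Nat.factorial_succ]
  push_cast
  have : ((m.toNat : Int)) = m := by omega
  rw [this]; ring

lemma factB_mono {a b : Int} (ha : 0 ≤ a) (hab : a ≤ b) : factB a ≤ factB b := by
  rw [factB_of_nonneg a ha, factB_of_nonneg b (by omega)]
  exact_mod_cast Nat.factorial_le (by omega)

-- the characterisation both ports are proved to satisfy: r is the largest i with i! ≤ n
def GoodAns (n r : Int) : Prop := 1 ≤ r ∧ factB r ≤ n ∧ n < factB (r + 1)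

lemma goodAns_unique {n r s : Int} (hr : GoodAns n r) (hs : GoodAns n s) : r = s := by
  obtain ⟨hr1, hr2, hr3⟩ := hr
  obtain ⟨hs1, hs2, hs3⟩ := hs
  by_contra hne
  rcases lt_or_gt_of_ne hne with h | h
  · have : factB (r + 1) ≤ factB s := factB_mono (by omega) (by omega)
    omega
  · have : factB (s + 1) ≤ factB r := factB_mono (by omega) (by omega)
    omega

-- A's loop yields a GoodAns: invariant a = fact(i-1) ≤ n
lemma loopA_good (n : Int) (hn : 1 ≤ n) :
    ∀ (k i : Nat) (a : Int), 1 ≤ i → a = factB ((i : Int) - 1) → a ≤ n →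
      k = (n + 1 - i).toNat →
      GoodAns n (solutionLoopA n (PySem.List.pyRange i (n + 1) 1) a ((i : Int) - 1)) := by
  intro k
  induction k with
  | zero =>
      intro i a hi ha han hk
      have hni : n < (i : Int) := by omega
      rw [PySem.List.pyRange_one_eq_nil (by omega)]
      simp only [solutionLoopA]
      refine ⟨by omega, by rw [← ha]; exact han, ?_⟩
      have : (i : Int) ≤ factB ((i : Int) - 1 + 1) := by
        have := factB_self_le (m := (i : Int)) (by exact_mod_cast hi)
        simpa using this
      omega
  | succ k ih =>
      intro i a hi ha han hk
      have hin : (i : Int) ≤ n := by omega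
      rw [PySem.List.pyRange_one_cons (by omega : (i : Int) < n + 1)]
      rw [solutionLoopA]
      have hfa : a * (i : Int) = factB (i : Int) := by
        have h := factB_succ (m := (i : Int) - 1) (by omega)
        norm_num at h
        rw [ha]
        exact h.symm
      by_cases hcond : a * (i : Int) ≤ n
      · simp only [if_pos hcond]
        have := ih (i + 1) (a * (i : Int)) (by omega)
          (by push_cast; rw [hfa]; norm_num) hcond (by omega)
        push_cast at this ⊢
        simpa using this
      · simp only [if_neg hcond]
        have hi2 : 2 ≤ i := by
          by_contra hlt
          have hi1 : i = 1 := by omega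
          subst hi1
          simp only [Nat.cast_one, mul_one] at hcond
          have : a = factB 0 := by simpa using ha
          have hf0 : factB (0 : Int) = 1 := by decide
          omega
        refine ⟨by omega, ?_, ?_⟩
        · rw [← ha]; exact han
        · have : factB ((i : Int) - 1 + 1) = factB (i : Int) := by norm_num
          rw [this, ← hfa]; omega

-- the doubling loop brackets the answer: fact(hi') ≤ n < fact(2·hi')
lemma dblLoop_good (n : Int) :
    ∀ (k : Nat) (hi : Int), 1 ≤ hi → factB hi ≤ n → (n - hi).toNat ≤ k →
      1 ≤ dblLoop n hi ∧ factB (dblLoop n hi) ≤ n ∧ n < factB (2 * dblLoop n hi) := by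
  intro k
  induction k with
  | zero =>
      intro hi h1 h2 hk
      have hstop : ¬ (factB (2 * hi) ≤ n) := by
        intro hc
        have := factB_self_le (m := 2 * hi) (by omega)
        omega
      rw [dblLoop, dif_neg (by tauto)]
      exact ⟨h1, h2, by omega⟩
  | succ k ih =>
      intro hi h1 h2 hk
      by_cases hc : factB (2 * hi) ≤ n
      · rw [dblLoop, dif_pos ⟨hc, h1⟩]
        apply ih (2 * hi) (by omega) hc
        have h := factB_self_le (m := 2 * hi) (by omega)
        omega
      · rw [dblLoop, dif_neg (by tauto)]
        exact ⟨h1, h2, by omega⟩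

-- the binary search keeps the bracket fact(lo) ≤ n < fact(hi) and returns a GoodAns
lemma bsLoop_good (n : Int) :
    ∀ (k : Nat) (lo hi : Int), 1 ≤ lo → lo < hi → factB lo ≤ n → n < factB hi →
      k = (hi - lo).toNat → GoodAns n (bsLoop n lo hi) := by
  intro k
  induction k using Nat.strong_induction_on with
  | _ k ih =>
      intro lo hi h1 hlh hlo hhi hk
      by_cases hgap : 1 < hi - lo
      · rw [bsLoop, dif_pos hgap]
        have hmid : PySem.Int.floordiv (lo + hi) 2 = (lo + hi) / 2 :=
          PySem.Int.floordiv_eq_ediv_of_pos (by omega)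
        simp only [hmid]
        by_cases hc : factB ((lo + hi) / 2) ≤ n
        · rw [if_pos hc]
          exact ih ((hi - (lo + hi) / 2).toNat) (by omega) _ _ (by omega) (by omega) hc hhi rfl
        · rw [if_neg hc]
          exact ih (((lo + hi) / 2 - lo).toNat) (by omega) _ _ h1 (by omega) hlo (by omega) rfl
      · rw [bsLoop, dif_neg hgap]
        have hhi1 : hi = lo + 1 := by omega
        exact ⟨h1, hlo, by rw [← hhi1]; exact hhi⟩

-- ===== VERDICT (by name: the statement is the Claim_ definition above) =====
theorem solution_spec : Claim_equal_solution := by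
  intro n _
  unfold Spec_solution
  by_cases hn : 1 ≤ n
  · have hA : GoodAns n (solution n) := by
      have := loopA_good n hn ((n + 1 - 1).toNat) 1 1 (by omega)
        (by decide) hn (by omega)
      simpa [solution] using this
    have hB : GoodAns n (solution_alt n) := by
      unfold solution_alt
      rw [if_neg (by omega)]
      obtain ⟨hd1, hd2, hd3⟩ := dblLoop_good n ((n - 1).toNat) 1 (by omega)
        (by have : factB (1:Int) = 1 := by decide
            omega) (le_refl _)
      exact bsLoop_good n ((2 * dblLoop n 1 - dblLoop n 1).toNat)
        (dblLoop n 1) (2 * dblLoop n 1) hd1 (by omega) hd2 hd3 rfl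
    exact goodAns_unique hA hB
  · unfold solution solution_alt
    rw [PySem.List.pyRange_one_eq_nil (by omega), if_pos (by omega)]
    rfl
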